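-- pv_equiv track=rewrite | github.com/Lgeu/snippet | snippet2.py | recurrence_relation_1
-- ===== SOURCE A (Python) =====
-- def recurrence_relation_1(x, y, a0, n, mod):
--     # 二項間漸化式 a_n = x * a_{n-1} + y
--     a = a0
--     while n:
--         n, m = divmod(n, 2)
--         if m:
--             a = (a * x + y) % mod
--         x, y = x * x % mod, (x * y + y) % mod
--     return a
-- ===== SOURCE B (Python) =====
-- def recurrence_relation_1(x, y, a0, n, mod):
--     # Top-down recursive exponentiation of the affine map (composition monoid),
--     # instead of A's bottom-up bit-scanning loop over a mutated accumulator.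
--     if not n:
--         return a0
--
--     def compose(p, q):
--         # (p o q)(a) = p0*(q0*a + q1) + p1
--         return (p[0] * q[0] % mod, (p[0] * q[1] + p[1]) % mod)
--
--     def power(k):
--         # the k-fold composition of the map a -> x*a + y, reduced mod
--         if k == 1:
--             return (x % mod, y % mod)
--         h = power(k // 2)
--         h2 = compose(h, h)
--         return compose((x, y), h2) if k % 2 else h2
--
--     X, Y = power(n)
--     return (X * a0 + Y) % mod
-- ===== Notes on version B (the rewrite author's own statement) =====
-- stated objective: alternative
-- what changed: B computes the n-fold affine map by a top-down recursive square-and-multiply in the composition monoid (a compose helper plus a recursive power), then applies the resulting pair to a0 once, instead of A's bottom-up loop that scans the bits of n while mutating the accumulator a and squaring (x,y) in lockstep.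
-- outside the precondition, e.g. on recurrence_relation_1(2, 3, 5, -1, 7): A does not finish within the time limit, B raises RecursionError; on recurrence_relation_1(2, 3, 5, 4, 0): A raises ZeroDivisionError, B raises ZeroDivisionError
import Mathlib
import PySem

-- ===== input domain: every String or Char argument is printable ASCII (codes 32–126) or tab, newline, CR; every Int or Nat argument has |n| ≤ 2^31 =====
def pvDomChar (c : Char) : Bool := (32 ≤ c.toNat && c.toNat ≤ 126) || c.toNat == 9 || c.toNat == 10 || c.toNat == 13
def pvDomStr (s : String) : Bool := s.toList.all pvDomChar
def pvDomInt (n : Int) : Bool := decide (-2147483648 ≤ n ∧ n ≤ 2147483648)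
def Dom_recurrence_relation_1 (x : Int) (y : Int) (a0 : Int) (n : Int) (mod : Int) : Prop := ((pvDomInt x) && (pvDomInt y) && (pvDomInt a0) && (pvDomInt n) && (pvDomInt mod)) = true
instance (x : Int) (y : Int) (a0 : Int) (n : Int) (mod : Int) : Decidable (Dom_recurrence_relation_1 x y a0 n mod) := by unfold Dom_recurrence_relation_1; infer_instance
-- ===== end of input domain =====

-- B replaces A's bottom-up bit-scanning loop over a mutated accumulator by a top-down
-- recursive exponentiation of the affine map in its composition monoid (alternative decomposition, same cost).

-- ===== PORT A =====
-- while n: n, m = divmod(n, 2); if m: a = (a*x+y) % mod; x, y = x*x % mod, (x*y+y) % mod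
-- (the 'if h : n ≤ 0' guard only totalizes the port: Python diverges for n < 0, excluded by Pre_)
def pvLoopA (x y a n mo : Int) : Int :=
  if h : n ≤ 0 then a
  else
    pvLoopA (PySem.Int.mod (x * x) mo) (PySem.Int.mod (x * y + y) mo)
      (if PySem.Int.mod n 2 ≠ 0 then PySem.Int.mod (a * x + y) mo else a)
      (PySem.Int.floordiv n 2) mo
termination_by n.toNat
decreasing_by
  rw [PySem.Int.floordiv_eq_ediv_of_pos (by omega : (0:Int) < 2)]
  omega

def recurrence_relation_1 (x : Int) (y : Int) (a0 : Int) (n : Int) (mod : Int) : Int :=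
  pvLoopA x y a0 n mod

-- ===== PORT B =====
-- def compose(p, q): return (p[0]*q[0] % mod, (p[0]*q[1] + p[1]) % mod)
def pvComposeB (mo : Int) (p q : Int × Int) : Int × Int :=
  (PySem.Int.mod (p.1 * q.1) mo, PySem.Int.mod (p.1 * q.2 + p.2) mo)

-- def power(k): if k == 1: return (x % mod, y % mod); h = power(k//2); h2 = compose(h, h);
--               return compose((x, y), h2) if k % 2 else h2
-- (the 'k ≤ 1' guard only totalizes the port: Python B recurses forever for k < 1, excluded by Pre_)
def pvPowerB (x y mo k : Int) : Int × Int :=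
  if h : k ≤ 1 then (PySem.Int.mod x mo, PySem.Int.mod y mo)
  else
    let h2 := pvComposeB mo (pvPowerB x y mo (PySem.Int.floordiv k 2)) (pvPowerB x y mo (PySem.Int.floordiv k 2))
    if PySem.Int.mod k 2 ≠ 0 then pvComposeB mo (x, y) h2 else h2
termination_by k.toNat
decreasing_by
  all_goals rw [PySem.Int.floordiv_eq_ediv_of_pos (by omega : (0:Int) < 2)]
  all_goals omega

def recurrence_relation_1_alt (x : Int) (y : Int) (a0 : Int) (n : Int) (mod : Int) : Int :=
  if n = 0 then a0
  else
    let p := pvPowerB x y mod n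
    PySem.Int.mod (p.1 * a0 + p.2) mod

-- ===== PRECONDITION & SPEC =====
-- Pre_ excludes n < 0 (both Pythons diverge there) and mod = 0 with n ≠ 0 (both raise ZeroDivisionError).
def Pre_recurrence_relation_1 (x : Int) (y : Int) (a0 : Int) (n : Int) (mod : Int) : Prop :=
  0 ≤ n ∧ (n = 0 ∨ mod ≠ 0)
instance (x : Int) (y : Int) (a0 : Int) (n : Int) (mod : Int) : Decidable (Pre_recurrence_relation_1 x y a0 n mod) := by unfold Pre_recurrence_relation_1; infer_instance

def pvWitness_recurrence_relation_1 : Int × Int × Int × Int × Int := (2, 3, 5, 4, 7)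

def Spec_recurrence_relation_1 (x : Int) (y : Int) (a0 : Int) (n : Int) (mod : Int) (out : Int) : Prop := out = recurrence_relation_1_alt x y a0 n mod
instance (x : Int) (y : Int) (a0 : Int) (n : Int) (mod : Int) (out : Int) : Decidable (Spec_recurrence_relation_1 x y a0 n mod out) := by unfold Spec_recurrence_relation_1; infer_instance

-- ===== CLAIM (what is proved, stated in full; the proofs are below) =====
def Claim_equal_recurrence_relation_1 : Prop := ∀ (x : Int) (y : Int) (a0 : Int) (n : Int) (mod : Int), Dom_recurrence_relation_1 x y a0 n mod → Pre_recurrence_relation_1 x y a0 n mod → Spec_recurrence_relation_1 x y a0 n mod (recurrence_relation_1 x y a0 n mod)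

-- ===== LEMMAS AND PROOFS =====

-- Python's % yields a congruent value: w ≡ w % mo  [ZMOD mo].
lemma pymod_modEq (w mo : Int) : Int.ModEq mo (PySem.Int.mod w mo) w := by
  have h := PySem.Int.floordiv_mul_add_mod w mo
  exact (Int.modEq_iff_dvd.2 ⟨-(PySem.Int.floordiv w mo), by rw [mul_neg, mul_comm mo (PySem.Int.floordiv w mo)]; linarith⟩).symm

-- Python's % is determined by the residue class (mo ≠ 0).
lemma pymod_eq_of_modEq {mo : Int} (hmo : mo ≠ 0) {u v : Int} (h : Int.ModEq mo u v) :
    PySem.Int.mod u mo = PySem.Int.mod v mo := by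
  have hu := pymod_modEq u mo
  have hv := pymod_modEq v mo
  have hd : mo ∣ (PySem.Int.mod v mo - PySem.Int.mod u mo) :=
    Int.ModEq.dvd (hu.trans (h.trans hv.symm))
  obtain ⟨k, hk⟩ := hd
  rcases lt_or_gt_of_ne hmo with hneg | hpos
  · have h1 := PySem.Int.mod_neg_bounds u hneg
    have h2 := PySem.Int.mod_neg_bounds v hneg
    have hk0 : k = 0 := by nlinarith [h1.1, h1.2, h2.1, h2.2]
    rw [hk0, mul_zero] at hk
    omega
  · have h1 := PySem.Int.mod_nonneg u hpos
    have h2 := PySem.Int.mod_lt u hpos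
    have h3 := PySem.Int.mod_nonneg v hpos
    have h4 := PySem.Int.mod_lt v hpos
    have hk0 : k = 0 := by nlinarith
    rw [hk0, mul_zero] at hk
    omega

-- Exact (unreduced) composition of affine maps and n-fold composition powers.
def affComp (p q : Int × Int) : Int × Int := (p.1 * q.1, p.1 * q.2 + p.2)

def affPow (x y : Int) : Nat → Int × Int
  | 0 => (1, 0)
  | n + 1 => affComp (x, y) (affPow x y n)

lemma affComp_assoc (p q r : Int × Int) : affComp p (affComp q r) = affComp (affComp p q) r := by
  simp only [affComp, Prod.mk.injEq]
  exact ⟨by ring, by ring⟩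

lemma affPow_add (x y : Int) (m n : Nat) :
    affPow x y (m + n) = affComp (affPow x y m) (affPow x y n) := by
  induction m with
  | zero => simp [affPow, affComp]
  | succ m ih =>
    have : m + 1 + n = (m + n) + 1 := by omega
    rw [this, affPow, ih, affPow, affComp_assoc]

lemma affPow_sq (x y : Int) (k : Nat) :
    affPow (x * x) (x * y + y) k = affPow x y (2 * k) := by
  induction k with
  | zero => rfl
  | succ k ih =>
    have h2 : 2 * (k + 1) = 2 + 2 * k := by omega
    rw [affPow, ih, h2, affPow_add, affPow, affPow, affPow]
    simp only [affComp, Prod.mk.injEq]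
    exact ⟨by ring, by ring⟩

-- Exact reference semantics of A's loop body over the integers.
def specLoop (x y a : Int) : Nat → Int
  | 0 => a
  | n + 1 =>
    specLoop (x * x) (x * y + y) (if (n + 1) % 2 ≠ 0 then a * x + y else a) ((n + 1) / 2)
decreasing_by exact Nat.div_lt_self (Nat.succ_pos n) (by omega)

lemma specLoop_eq_affPow (N : Nat) : ∀ x y a, specLoop x y a N = (affPow x y N).1 * a + (affPow x y N).2 := by
  induction N using Nat.strong_induction_on with
  | _ N ih =>
    intro x y a
    match N with
    | 0 => simp [specLoop, affPow]
    | Nat.succ n =>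
      simp only [Nat.succ_eq_add_one]
      rw [specLoop, ih ((n + 1) / 2) (Nat.div_lt_self (Nat.succ_pos n) (by omega)),
        affPow_sq]
      by_cases hodd : (n + 1) % 2 ≠ 0
      · simp only [if_pos hodd]
        have hsplit : n + 1 = 2 * ((n + 1) / 2) + 1 := by omega
        conv_rhs => rw [hsplit]
        rw [affPow_add]
        simp only [affPow, affComp]
        ring
      · simp only [if_neg hodd]
        have hsplit : n + 1 = 2 * ((n + 1) / 2) := by omega
        conv_rhs => rw [hsplit]

-- A's loop is congruent to the exact reference and (for n > 0) returns a canonical residue.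
lemma loopA_spec (N : Nat) : ∀ x y a n mo X Y c, n.toNat = N → 0 < n → mo ≠ 0 →
    Int.ModEq mo x X → Int.ModEq mo y Y → Int.ModEq mo a c →
    Int.ModEq mo (pvLoopA x y a n mo) (specLoop X Y c n.toNat) ∧
      ∃ w, pvLoopA x y a n mo = PySem.Int.mod w mo := by
  induction N using Nat.strong_induction_on with
  | _ N ih =>
    intro x y a n mo X Y c hN hn hmo hx hy ha
    have hnle : ¬ n ≤ 0 := by omega
    rw [pvLoopA, dif_neg hnle]
    have hq : PySem.Int.floordiv n 2 = n / 2 := PySem.Int.floordiv_eq_ediv_of_pos (by omega)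
    have hm : PySem.Int.mod n 2 = n % 2 := PySem.Int.mod_eq_emod_of_pos (by omega)
    have hNpos : 0 < N := by omega
    obtain ⟨M, hM⟩ : ∃ M, N = M + 1 := ⟨N - 1, by omega⟩
    have hNn : n.toNat = M + 1 := by omega
    have hspec : specLoop X Y c n.toNat =
        specLoop (X * X) (X * Y + Y) (if n.toNat % 2 ≠ 0 then c * X + Y else c) (n.toNat / 2) := by
      rw [hNn, specLoop]
    rw [hspec]
    have hbit_iff : PySem.Int.mod n 2 ≠ 0 ↔ n.toNat % 2 ≠ 0 := by
      rw [hm]; omega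
    have hx2 : Int.ModEq mo (PySem.Int.mod (x * x) mo) (X * X) :=
      (pymod_modEq _ mo).trans (hx.mul hx)
    have hy2 : Int.ModEq mo (PySem.Int.mod (x * y + y) mo) (X * Y + Y) :=
      (pymod_modEq _ mo).trans ((hx.mul hy).add hy)
    have ha2 : Int.ModEq mo (if PySem.Int.mod n 2 ≠ 0 then PySem.Int.mod (a * x + y) mo else a)
        (if n.toNat % 2 ≠ 0 then c * X + Y else c) := by
      by_cases hb : n.toNat % 2 ≠ 0
      · rw [if_pos (hbit_iff.2 hb), if_pos hb]
        exact (pymod_modEq _ mo).trans ((ha.mul hx).add hy)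
      · rw [if_neg (fun h => hb (hbit_iff.1 h)), if_neg hb]
        exact ha
    by_cases hq0 : n / 2 = 0
    · -- last iteration
      have hn1 : n = 1 := by omega
      have hbit : PySem.Int.mod n 2 ≠ 0 := by rw [hm, hn1]; decide
      have hnt2 : n.toNat / 2 = 0 := by omega
      rw [hq, hq0, hnt2]
      rw [pvLoopA, dif_pos (le_refl (0 : Int))]
      refine ⟨?_, a * x + y, ?_⟩
      · rw [if_pos hbit]
        show Int.ModEq mo _ (specLoop (X * X) (X * Y + Y) _ 0)
        rw [specLoop]
        have hb' : n.toNat % 2 ≠ 0 := by omega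
        rw [if_pos hb']
        exact (pymod_modEq _ mo).trans ((ha.mul hx).add hy)
      · rw [if_pos hbit]
    · have hqpos : 0 < n / 2 := by omega
      have hhalf : (n / 2).toNat = n.toNat / 2 := by omega
      rw [hq]
      have := ih (n / 2).toNat (by omega)
        (PySem.Int.mod (x * x) mo) (PySem.Int.mod (x * y + y) mo)
        (if PySem.Int.mod n 2 ≠ 0 then PySem.Int.mod (a * x + y) mo else a)
        (n / 2) mo (X * X) (X * Y + Y) (if n.toNat % 2 ≠ 0 then c * X + Y else c)
        rfl hqpos hmo hx2 hy2 ha2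
      rw [hhalf] at this
      exact this

-- B's recursive power is congruent, componentwise, to the exact affine power.
lemma powerB_spec (N : Nat) : ∀ x y mo k, k.toNat = N → 1 ≤ k → mo ≠ 0 →
    Int.ModEq mo (pvPowerB x y mo k).1 (affPow x y k.toNat).1 ∧
      Int.ModEq mo (pvPowerB x y mo k).2 (affPow x y k.toNat).2 := by
  induction N using Nat.strong_induction_on with
  | _ N ih =>
    intro x y mo k hN hk hmo
    rw [pvPowerB]
    by_cases h1 : k ≤ 1
    · have hk1 : k = 1 := le_antisymm h1 hk
      rw [dif_pos h1, hk1]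
      show Int.ModEq mo (PySem.Int.mod x mo) (affPow x y 1).1 ∧
        Int.ModEq mo (PySem.Int.mod y mo) (affPow x y 1).2
      simp only [affPow, affComp, mul_one, mul_zero, zero_add]
      exact ⟨pymod_modEq x mo, pymod_modEq y mo⟩
    · rw [dif_neg h1]
      have hq : PySem.Int.floordiv k 2 = k / 2 := PySem.Int.floordiv_eq_ediv_of_pos (by omega)
      have hm : PySem.Int.mod k 2 = k % 2 := PySem.Int.mod_eq_emod_of_pos (by omega)
      have hhalf1 : 1 ≤ k / 2 := by omega
      obtain ⟨ihX, ihY⟩ := ih (k / 2).toNat (by omega) x y mo (k / 2) rfl hhalf1 hmo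
      rw [hq]
      set p := pvPowerB x y mo (k / 2) with hp
      set P := affPow x y (k / 2).toNat with hP
      have hsq1 : Int.ModEq mo (pvComposeB mo p p).1 (affComp P P).1 :=
        (pymod_modEq _ mo).trans (ihX.mul ihX)
      have hsq2 : Int.ModEq mo (pvComposeB mo p p).2 (affComp P P).2 :=
        (pymod_modEq _ mo).trans ((ihX.mul ihY).add ihY)
      have hPP : affComp P P = affPow x y (2 * ((k / 2).toNat)) := by
        have : 2 * (k / 2).toNat = (k / 2).toNat + (k / 2).toNat := by omega
        rw [this, affPow_add]
      by_cases hb : PySem.Int.mod k 2 ≠ 0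
      · simp only [if_pos hb]
        have hksplit : k.toNat = 2 * (k / 2).toNat + 1 := by
          rw [hm] at hb; omega
        rw [hksplit]
        have hpow : affPow x y (2 * (k / 2).toNat + 1) = affComp (x, y) (affPow x y (2 * (k / 2).toNat)) := by
          rw [affPow]
        rw [hpow, ← hPP]
        constructor
        · exact (pymod_modEq _ mo).trans (Int.ModEq.mul_left x hsq1)
        · exact (pymod_modEq _ mo).trans ((Int.ModEq.mul_left x hsq2).add_right y)
      · simp only [if_neg hb]
        have hksplit : k.toNat = 2 * (k / 2).toNat := by
          rw [hm] at hb; omega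
        rw [hksplit, ← hPP]
        exact ⟨hsq1, hsq2⟩

-- ===== VERDICT (by name: the statement is the Claim_ definition above) =====
theorem recurrence_relation_1_spec : Claim_equal_recurrence_relation_1 := by
  intro x y a0 n mo _ hpre
  unfold Spec_recurrence_relation_1 recurrence_relation_1 recurrence_relation_1_alt
  obtain ⟨hn, hmo⟩ := hpre
  by_cases h0 : n = 0
  · subst h0
    rw [if_pos rfl, pvLoopA, dif_pos (le_refl (0 : Int))]
  · rw [if_neg h0]
    have hmo' : mo ≠ 0 := hmo.resolve_left h0
    obtain ⟨hcongA, w, hw⟩ :=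
      loopA_spec n.toNat x y a0 n mo x y a0 rfl (by omega) hmo'
        Int.ModEq.rfl Int.ModEq.rfl Int.ModEq.rfl
    obtain ⟨hX, hY⟩ := powerB_spec n.toNat x y mo n rfl (by omega) hmo'
    rw [hw] at hcongA ⊢
    have hspec : specLoop x y a0 n.toNat = (affPow x y n.toNat).1 * a0 + (affPow x y n.toNat).2 :=
      specLoop_eq_affPow n.toNat x y a0
    have hc : Int.ModEq mo w ((pvPowerB x y mo n).1 * a0 + (pvPowerB x y mo n).2) := by
      have h1 : Int.ModEq mo (PySem.Int.mod w mo)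
          ((pvPowerB x y mo n).1 * a0 + (pvPowerB x y mo n).2) := by
        rw [hspec] at hcongA
        exact hcongA.trans ((hX.mul_right a0).add hY).symm
      exact (pymod_modEq w mo).symm.trans h1
    calc PySem.Int.mod w mo
        = PySem.Int.mod (PySem.Int.mod w mo) mo := by
          exact (pymod_eq_of_modEq hmo' ((pymod_modEq w mo))).symm
      _ = PySem.Int.mod ((pvPowerB x y mo n).1 * a0 + (pvPowerB x y mo n).2) mo :=
          pymod_eq_of_modEq hmo' ((pymod_modEq w mo).trans hc)
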